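-- pv_equiv track=rewrite | github.com/SebastianOM1/footballquipu | database/parse.py | numbers_in_front
-- ===== SOURCE A (Python) =====
-- def numbers_in_front(arr, i):
--     total = 0
--     for index in range(i+1, len(arr)):
--         if any([c.isnumeric() for c in arr[index]]) or arr[index].strip() == '-' or arr[index].strip() == '+':
--             total += 1
--         else:
--             return total
--     return total + 1
-- ===== SOURCE B (Python) =====
-- def numbers_in_front(arr, i):
--     # Backwards pass: fold over the indices in reverse with a suffix accumulator
--     # that resets to 0 on a non-matching element.  acc is the answer for the
--     # suffix starting at each position (trailing +1 built in via the initial 1).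
--     acc = 1
--     for j in reversed(range(i + 1, len(arr))):
--         x = arr[j]
--         acc = acc + 1 if (any(c.isnumeric() for c in x) or x.strip() in ('-', '+')) else 0
--     return acc
-- ===== Notes on version B (the rewrite author's own statement) =====
-- stated objective: alternative
-- what changed: Replaces A's forward counting loop with early return by a single backward pass: a right-to-left fold whose accumulator (seeded with the trailing +1) resets to 0 at each non-matching element, so the final accumulator is the answer and no early exit exists.
import Mathlib
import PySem

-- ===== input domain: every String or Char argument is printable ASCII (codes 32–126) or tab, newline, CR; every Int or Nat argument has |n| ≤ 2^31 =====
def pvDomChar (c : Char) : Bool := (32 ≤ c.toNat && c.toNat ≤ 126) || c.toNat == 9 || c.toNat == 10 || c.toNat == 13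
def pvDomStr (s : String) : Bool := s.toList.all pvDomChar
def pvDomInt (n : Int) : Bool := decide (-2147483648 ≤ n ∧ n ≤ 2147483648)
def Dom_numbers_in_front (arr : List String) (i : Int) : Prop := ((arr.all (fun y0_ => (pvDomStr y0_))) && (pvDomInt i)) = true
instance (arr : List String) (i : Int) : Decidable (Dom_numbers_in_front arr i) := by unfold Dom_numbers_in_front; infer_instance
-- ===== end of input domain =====

-- B replaces A's forward loop with early return by one backward fold whose accumulator
-- resets to 0 on a non-matching element (objective: alternative; same cost).

-- ===== PORT A =====
-- c.isnumeric(): on the ASCII domain isnumeric coincides with isdigit (exact on Dom).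
def pvPredA (s : String) : Bool :=
  ((s.toList.map (fun c => PySem.Chars.isdigit c)).any id) ||
    PySem.Str.strip s == "-" || PySem.Str.strip s == "+"

-- arr[index]: negative indices wrap (PySem.List.pyGet?); out-of-range would raise IndexError in
-- Python, which Pre_ excludes, so the .getD "" default is never reached on admitted inputs.
def numbersLoopA (arr : List String) : List Int → Int → Int
  | [], total => total + 1
  | j :: rest, total =>
    if pvPredA ((PySem.List.pyGet? arr j).getD "") then numbersLoopA arr rest (total + 1)
    else total

def numbers_in_front (arr : List String) (i : Int) : Int :=
  numbersLoopA arr (PySem.List.pyRange (i + 1) (arr.length : Int) 1) 0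

-- ===== PORT B =====
def pvPredB (s : String) : Bool :=
  (s.toList.any (fun c => PySem.Chars.isdigit c)) ||
    (PySem.Str.strip s == "-" || PySem.Str.strip s == "+")

-- reversed(range(i+1, len(arr))) with the reset-or-increment accumulator; arr[j] again via
-- pyGet? with the never-reached (under Pre_) default "".
def numbers_in_front_alt (arr : List String) (i : Int) : Int :=
  ((PySem.List.pyRange (i + 1) (arr.length : Int) 1).reverse).foldl
    (fun acc j => if pvPredB ((PySem.List.pyGet? arr j).getD "") then acc + 1 else 0) 1

-- ===== PRECONDITION & SPEC =====
-- Pre_ excludes exactly the inputs where Python A (and B) raises IndexError: a nonempty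
-- index range whose first index i+1 is below -len(arr).
def Pre_numbers_in_front (arr : List String) (i : Int) : Prop :=
  (-(arr.length : Int) ≤ i + 1) ∨ ((arr.length : Int) ≤ i + 1)
instance (arr : List String) (i : Int) : Decidable (Pre_numbers_in_front arr i) := by
  unfold Pre_numbers_in_front; infer_instance

def pvWitness_numbers_in_front : List String × Int := (["12", "+", "abc"], 0)

def Spec_numbers_in_front (arr : List String) (i : Int) (out : Int) : Prop := out = numbers_in_front_alt arr i
instance (arr : List String) (i : Int) (out : Int) : Decidable (Spec_numbers_in_front arr i out) := by unfold Spec_numbers_in_front; infer_instance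

-- ===== CLAIM (what is proved, stated in full; the proofs are below) =====
def Claim_equal_numbers_in_front : Prop := ∀ (arr : List String) (i : Int), Dom_numbers_in_front arr i → Pre_numbers_in_front arr i → Spec_numbers_in_front arr i (numbers_in_front arr i)

-- ===== LEMMAS AND PROOFS =====

theorem pvPred_eq (s : String) : pvPredA s = pvPredB s := by
  unfold pvPredA pvPredB
  rw [List.any_map, Bool.or_assoc]
  rfl

-- A's loop is total + the right fold B computes backwards.
theorem numbersLoopA_eq_foldr (arr : List String) (l : List Int) (total : Int) :
    numbersLoopA arr l total =
      total + l.foldr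
        (fun j acc => if pvPredB ((PySem.List.pyGet? arr j).getD "") then acc + 1 else 0) 1 := by
  induction l generalizing total with
  | nil => simp [numbersLoopA]
  | cons j rest ih =>
    simp only [numbersLoopA, pvPred_eq, List.foldr_cons]
    by_cases h : pvPredB ((PySem.List.pyGet? arr j).getD "") = true
    · simp only [h, if_true]; rw [ih]; ring
    · simp only [eq_false_of_ne_true h]; simp

-- ===== VERDICT (by name: the statement is the Claim_ definition above) =====
theorem numbers_in_front_spec : Claim_equal_numbers_in_front := by
  intro arr i _ _
  unfold Spec_numbers_in_front numbers_in_front numbers_in_front_alt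
  rw [List.foldl_reverse, numbersLoopA_eq_foldr]
  simp
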